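-- pv_equiv track=rewrite | github.com/Prashant-900/NASA-APP-CHALLENGE | backend/ai/web_search.py | _create_search_summary
-- ===== SOURCE A (Python) =====
-- from typing import Dict, List, Any, Optional
--
-- def _create_search_summary(query: str, results: List[Dict[str, Any]]) -> str:
--     """Create a summary from search results"""
--     if not results:
--         return f"No information found for '{query}'."
--
--     summary_parts = []
--
--     # Group by source
--     sources = {}
--     for result in results:
--         source = result.get('source', 'Unknown')
--         if source not in sources:
--             sources[source] = []
--         sources[source].append(result)
--
--     for source, source_results in sources.items():
--         if source_results:
--             best_result = source_results[0]  # Take the first/best result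
--             snippet = best_result.get('snippet', '')
--             if snippet:
--                 # Truncate snippet if too long
--                 if len(snippet) > 200:
--                     snippet = snippet[:200] + "..."
--                 summary_parts.append(f"**{source}**: {snippet}")
--
--     if summary_parts:
--         return "\n\n".join(summary_parts)
--     else:
--         return f"Found {len(results)} results for '{query}' but no detailed information available."
-- ===== SOURCE B (Python) =====
-- def _create_search_summary(query, results):
--     """Create a summary from search results (recursive, first occurrence per source)."""
--     if not results:
--         return f"No information found for '{query}'."
--
--     def parts(rs, seen):
--         if not rs:
--             return []
--         first, rest = rs[0], rs[1:]
--         source = first.get('source', 'Unknown')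
--         if source in seen:
--             return parts(rest, seen)
--         snippet = first.get('snippet', '')
--         if not snippet:
--             return parts(rest, seen + [source])
--         text = snippet if len(snippet) <= 200 else snippet[:200] + "..."
--         return [f"**{source}**: {text}"] + parts(rest, seen + [source])
--
--     summary_parts = parts(results, [])
--     if summary_parts:
--         return "\n\n".join(summary_parts)
--     return f"Found {len(results)} results for '{query}' but no detailed information available."
-- ===== Notes on version B (the rewrite author's own statement) =====
-- stated objective: simpler
-- what changed: Replaced the two-phase dict-of-lists grouping (build a sources table, then iterate its items taking each group's first element) with a structurally recursive helper over the result list that emits each line at the first occurrence of its source, threading the seen-source list through the recursion and building the output front-to-back by cons.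
import Mathlib
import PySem

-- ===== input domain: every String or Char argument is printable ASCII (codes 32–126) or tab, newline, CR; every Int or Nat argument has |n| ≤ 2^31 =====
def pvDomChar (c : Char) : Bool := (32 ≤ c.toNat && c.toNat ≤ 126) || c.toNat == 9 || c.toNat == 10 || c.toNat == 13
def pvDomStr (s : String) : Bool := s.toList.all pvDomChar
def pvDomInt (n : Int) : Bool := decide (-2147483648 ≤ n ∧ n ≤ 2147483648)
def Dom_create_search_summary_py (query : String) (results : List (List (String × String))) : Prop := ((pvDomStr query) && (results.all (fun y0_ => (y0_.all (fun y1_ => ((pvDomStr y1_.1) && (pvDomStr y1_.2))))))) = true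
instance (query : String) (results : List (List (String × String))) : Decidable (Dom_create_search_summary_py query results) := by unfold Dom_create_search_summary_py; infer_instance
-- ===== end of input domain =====

-- B replaces A's two-phase dict-of-lists grouping by a structurally recursive helper that
-- emits each "**source**: snippet" line at the first occurrence of its source (simpler decomposition).

-- ===== PORT A =====
def create_search_summary_py (query : String) (results : List (List (String × String))) : String :=
  if results = [] then
    "No information found for '" ++ query ++ "'."
  else
    -- Group by source
    let sources : PySem.Dict String (List (List (String × String))) :=
      results.foldl (fun sources result =>
        let source := (PySem.Dict.ofList result).getD "source" "Unknown"
        let sources := if sources.contains source then sources else sources.insert source []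
        sources.modify source [] (fun l => l ++ [result])) PySem.Dict.empty
    let summary_parts : List String :=
      sources.items.foldl (fun summary_parts kv =>
        match kv.2 with
        | [] => summary_parts
        | best_result :: _ =>
          let snippet := (PySem.Dict.ofList best_result).getD "snippet" ""
          if snippet ≠ "" then
            let snippet := if 200 < PySem.Str.len snippet
              then PySem.Str.slice snippet none (some 200) ++ "..." else snippet
            summary_parts ++ ["**" ++ kv.1 ++ "**: " ++ snippet]
          else summary_parts) []
    if summary_parts ≠ [] then
      PySem.Str.join "\n\n" summary_parts
    else
      "Found " ++ PySem.Int.toStr (results.length : Int) ++ " results for '" ++ query ++ "' but no detailed information available."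

-- ===== PORT B =====
/-- Source B's inner recursive `parts(rs, seen)`. -/
def pvPartsRec : List (List (String × String)) → List String → List String
  | [], _ => []
  | first :: rest, seen =>
    let source := (PySem.Dict.ofList first).getD "source" "Unknown"
    if seen.contains source then
      pvPartsRec rest seen
    else
      let snippet := (PySem.Dict.ofList first).getD "snippet" ""
      if snippet = "" then
        pvPartsRec rest (seen ++ [source])
      else
        let text := if PySem.Str.len snippet ≤ 200 then snippet
          else PySem.Str.slice snippet none (some 200) ++ "..."
        ("**" ++ source ++ "**: " ++ text) :: pvPartsRec rest (seen ++ [source])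

def create_search_summary_py_alt (query : String) (results : List (List (String × String))) : String :=
  if results = [] then
    "No information found for '" ++ query ++ "'."
  else
    let summary_parts := pvPartsRec results []
    if summary_parts ≠ [] then
      PySem.Str.join "\n\n" summary_parts
    else
      "Found " ++ PySem.Int.toStr (results.length : Int) ++ " results for '" ++ query ++ "' but no detailed information available."

-- ===== PRECONDITION & SPEC =====
def Spec_create_search_summary_py (query : String) (results : List (List (String × String))) (out : String) : Prop := out = create_search_summary_py_alt query results
instance (query : String) (results : List (List (String × String))) (out : String) : Decidable (Spec_create_search_summary_py query results out) := by unfold Spec_create_search_summary_py; infer_instance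

-- ===== CLAIM (what is proved, stated in full; the proofs are below) =====
def Claim_equal_create_search_summary_py : Prop := ∀ (query : String) (results : List (List (String × String))), Dom_create_search_summary_py query results → Spec_create_search_summary_py query results (create_search_summary_py query results)

-- ===== LEMMAS AND PROOFS =====

/-- `result.get('source', 'Unknown')`. -/
def pvSrc (r : List (String × String)) : String := (PySem.Dict.ofList r).getD "source" "Unknown"
/-- `result.get('snippet', '')`. -/
def pvSnip (r : List (String × String)) : String := (PySem.Dict.ofList r).getD "snippet" ""
/-- the formatted summary line (A's truncation spelling). -/
def pvFmt (k s : String) : String :=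
  "**" ++ k ++ "**: " ++ (if 200 < PySem.Str.len s then PySem.Str.slice s none (some 200) ++ "..." else s)

/-- A's grouping dict. -/
def pvGroup (results : List (List (String × String))) : PySem.Dict String (List (List (String × String))) :=
  results.foldl (fun sources result =>
    let source := pvSrc result
    let sources := if sources.contains source then sources else sources.insert source []
    sources.modify source [] (fun l => l ++ [result])) PySem.Dict.empty

/-- A's second-pass step. -/
def pvStepA (summary_parts : List String) (kv : String × List (List (String × String))) : List String :=
  match kv.2 with
  | [] => summary_parts
  | best_result :: _ =>
    let snippet := pvSnip best_result
    if snippet ≠ "" then summary_parts ++ [pvFmt kv.1 snippet]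
    else summary_parts

def pvPartsA (results : List (List (String × String))) : List String :=
  (pvGroup results).items.foldl pvStepA []

/-- proof-side single-pass step (set of seen sources, accumulated parts). -/
def pvStepB (st : PySem.Set String × List String) (result : List (String × String)) :
    PySem.Set String × List String :=
  let source := pvSrc result
  if st.1.contains source then st
  else
    let seen := st.1.add source
    let snippet := pvSnip result
    if snippet ≠ "" then (seen, st.2 ++ [pvFmt source snippet])
    else (seen, st.2)

def pvSt (results : List (List (String × String))) : PySem.Set String × List String :=
  results.foldl pvStepB (PySem.Set.empty, [])

theorem pvSetdefault_modify {κ β : Type} [BEq κ] [LawfulBEq κ]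
    (d : PySem.Dict κ (List β)) (k : κ) (f : List β → List β) :
    (if d.contains k then d else d.insert k []).modify k ([] : List β) f = d.modify k [] f := by
  by_cases h : d.contains k = true
  · simp [h]
  · simp only [h, Bool.false_eq_true, if_false]
    unfold PySem.Dict.modify
    rw [PySem.Dict.insert_insert_self, PySem.Dict.getD_insert_self,
        PySem.Dict.getD_of_not_contains (h := by simpa using h)]

theorem pvGroup_eq (results : List (List (String × String))) :
    pvGroup results = results.foldl (fun d r => d.modify (pvSrc r) [] (fun l => l ++ [r])) PySem.Dict.empty := by
  unfold pvGroup
  exact PySem.List.foldl_congr_mem _ _ _ _ (fun acc x _ => pvSetdefault_modify acc (pvSrc x) _)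

theorem pvGroup_keys (results : List (List (String × String))) :
    (pvGroup results).keys = PySem.Set.ofList (results.map pvSrc) := by
  rw [pvGroup_eq, PySem.Dict.keys_foldl_modify_key results pvSrc [] (fun _ r => fun l => l ++ [r]),
    PySem.Dict.keys_empty, PySem.Set.update_nil_left]

theorem pvGroup_keys_nodup (results : List (List (String × String))) :
    (pvGroup results).keys.Nodup := by
  rw [pvGroup_eq]
  exact PySem.Dict.nodup_keys_foldl_modify_key results pvSrc [] (fun _ r => fun l => l ++ [r])
    PySem.Dict.empty PySem.Dict.nodup_keys_empty

theorem pvGroup_getD (results : List (List (String × String))) (c : String) :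
    (pvGroup results).getD c [] = results.filter (fun r => pvSrc r == c) := by
  rw [pvGroup_eq,
    show results.foldl (fun d r => d.modify (pvSrc r) [] (fun l => l ++ [r])) PySem.Dict.empty
      = (results.map (fun r => (pvSrc r, r))).foldl
          (fun d p => d.modify p.1 [] (fun l => l ++ [p.2])) PySem.Dict.empty from
      (List.foldl_map (f := fun r => (pvSrc r, r))
        (g := fun d p => d.modify p.1 [] (fun l => l ++ [p.2]))
        (l := results) (init := PySem.Dict.empty)).symm,
    PySem.Dict.getD_foldl_modify_append, List.filter_map, List.map_map]
  simp [Function.comp_def]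

theorem pvPartsA_eq_keysfold (results : List (List (String × String))) :
    pvPartsA results =
      (PySem.Set.ofList (results.map pvSrc)).foldl
        (fun acc k => pvStepA acc (k, results.filter (fun r => pvSrc r == k))) [] := by
  unfold pvPartsA
  rw [PySem.Dict.items_eq_map_keys (pvGroup results) (pvGroup_keys_nodup results) [],
    List.foldl_map, pvGroup_keys]
  exact PySem.List.foldl_congr_mem _ _ _ _ (fun acc k _ => by rw [pvGroup_getD])

theorem pvSt_seen (results : List (List (String × String))) :
    (pvSt results).1 = PySem.Set.ofList (results.map pvSrc) := by
  have aux : ∀ (l : List (List (String × String))) (st : PySem.Set String × List String),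
      (l.foldl pvStepB st).1 = PySem.Set.update st.1 (l.map pvSrc) := by
    intro l
    induction l with
    | nil => intro st; rfl
    | cons r t ih =>
      intro st
      rw [List.foldl_cons, ih, List.map_cons]
      have hstep : (pvStepB st r).1 = st.1.add (pvSrc r) := by
        unfold pvStepB PySem.Set.add
        by_cases h : st.1.contains (pvSrc r) <;> (split_ifs <;> simp_all) <;> split_ifs <;> rfl
      rw [hstep]; rfl
  rw [pvSt, aux]; exact PySem.Set.update_nil_left _

theorem pvParts_eq (results : List (List (String × String))) :
    pvPartsA results = (pvSt results).2 := by
  induction results using List.reverseRecOn with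
  | nil => rfl
  | append_singleton l r ih =>
    have helem : ∀ k, k ∈ l.map pvSrc → ∀ acc,
        pvStepA acc (k, (l ++ [r]).filter (fun r' => pvSrc r' == k))
          = pvStepA acc (k, l.filter (fun r' => pvSrc r' == k)) := by
      intro k hk acc
      rw [List.filter_append]
      rcases hfl : l.filter (fun r' => pvSrc r' == k) with _ | ⟨a, t⟩
      · exfalso
        obtain ⟨r0, hr0, hsrc⟩ := List.mem_map.mp hk
        have hmem : r0 ∈ l.filter (fun r' => pvSrc r' == k) :=
          List.mem_filter.mpr ⟨hr0, by simp [hsrc]⟩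
        simp [hfl] at hmem
      · rfl
    have hkeys : PySem.Set.ofList ((l ++ [r]).map pvSrc)
        = (PySem.Set.ofList (l.map pvSrc)).add (pvSrc r) := by
      simp [PySem.Set.ofList_eq_foldl, List.foldl_append]
    have hBst : pvSt (l ++ [r]) = pvStepB (pvSt l) r := by
      rw [pvSt, List.foldl_append]; rfl
    rw [pvPartsA_eq_keysfold, hkeys, hBst]
    by_cases hc : pvSrc r ∈ PySem.Set.ofList (l.map pvSrc)
    · have hcontT : PySem.Set.contains (PySem.Set.ofList (l.map pvSrc)) (pvSrc r) = true := by
        simp only [PySem.Set.contains]; simpa using hc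
      have hadd : (PySem.Set.ofList (l.map pvSrc)).add (pvSrc r)
          = PySem.Set.ofList (l.map pvSrc) := by
        unfold PySem.Set.add
        simp only [hcontT, if_true]
      have hB2 : (pvStepB (pvSt l) r).2 = (pvSt l).2 := by
        unfold pvStepB
        simp only [pvSt_seen, hcontT, if_true]
      rw [hadd, hB2,
        PySem.List.foldl_congr_mem _ _ _ _
          (fun acc k hkmem => helem k ((PySem.Set.mem_ofList _ _).mp hkmem) acc),
        ← pvPartsA_eq_keysfold, ih]
    · have hcontF : PySem.Set.contains (PySem.Set.ofList (l.map pvSrc)) (pvSrc r) = false := by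
        simp only [PySem.Set.contains]; simpa using hc
      have hadd : (PySem.Set.ofList (l.map pvSrc)).add (pvSrc r)
          = PySem.Set.ofList (l.map pvSrc) ++ [pvSrc r] := by
        unfold PySem.Set.add
        simp only [hcontF, Bool.false_eq_true, if_false]
      have hnotin : pvSrc r ∉ l.map pvSrc := fun h => hc ((PySem.Set.mem_ofList _ _).mpr h)
      have hfilt : l.filter (fun r' => pvSrc r' == pvSrc r) = [] := by
        rw [List.filter_eq_nil_iff]
        intro a ha hbeq
        exact hnotin (List.mem_map.mpr ⟨a, ha, (beq_iff_eq.mp hbeq)⟩)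
      rw [hadd, List.foldl_append,
        PySem.List.foldl_congr_mem _ _ _ _
          (fun acc k hkmem => helem k ((PySem.Set.mem_ofList _ _).mp hkmem) acc),
        ← pvPartsA_eq_keysfold, ih]
      show pvStepA (pvSt l).2 (pvSrc r, (l ++ [r]).filter (fun r' => pvSrc r' == pvSrc r))
          = (pvStepB (pvSt l) r).2
      rw [List.filter_append, hfilt, List.nil_append]
      have hone : [r].filter (fun r' => pvSrc r' == pvSrc r) = [r] := by simp
      rw [hone]
      unfold pvStepA pvStepB
      simp only [pvSt_seen, hcontF, Bool.false_eq_true, if_false]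
      split_ifs <;> rfl

/-- the fold-state formulation computes exactly B's recursion. -/
theorem pvFold_eq_rec (rs : List (List (String × String))) :
    ∀ (seen acc : List String), (rs.foldl pvStepB (seen, acc)).2 = acc ++ pvPartsRec rs seen := by
  induction rs with
  | nil => intro seen acc; simp [pvPartsRec]
  | cons r t ih =>
    intro seen acc
    rw [List.foldl_cons]
    by_cases hc : seen.contains (pvSrc r) = true
    · have h1 : pvStepB (seen, acc) r = (seen, acc) := by
        unfold pvStepB; simp only [PySem.Set.contains, hc, if_true]
      have h2 : pvPartsRec (r :: t) seen = pvPartsRec t seen := by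
        show (if seen.contains (pvSrc r) then _ else _) = _
        rw [if_pos hc]
      rw [h1, h2, ih]
    · have hadd : PySem.Set.add seen (pvSrc r) = seen ++ [pvSrc r] := by
        unfold PySem.Set.add
        simp only [PySem.Set.contains, hc, Bool.false_eq_true, if_false]
      by_cases hs : pvSnip r = ""
      · have h1 : pvStepB (seen, acc) r = (seen ++ [pvSrc r], acc) := by
          unfold pvStepB
          simp only [PySem.Set.contains, hc, Bool.false_eq_true, if_false, hadd, hs,
            ne_eq, not_true_eq_false, if_false]
        have h2 : pvPartsRec (r :: t) seen = pvPartsRec t (seen ++ [pvSrc r]) := by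
          show (if seen.contains (pvSrc r) then _ else if pvSnip r = "" then _ else _) = _
          rw [if_neg hc, if_pos hs]
          rfl
        rw [h1, h2, ih]
      · have htext : (if PySem.Str.len (pvSnip r) ≤ 200 then pvSnip r
            else PySem.Str.slice (pvSnip r) none (some 200) ++ "...")
            = (if 200 < PySem.Str.len (pvSnip r)
                then PySem.Str.slice (pvSnip r) none (some 200) ++ "..." else pvSnip r) := by
          by_cases h200 : PySem.Str.len (pvSnip r) ≤ 200
          · rw [if_pos h200, if_neg (by omega)]
          · rw [if_neg h200, if_pos (by omega)]
        have h1 : pvStepB (seen, acc) r = (seen ++ [pvSrc r], acc ++ [pvFmt (pvSrc r) (pvSnip r)]) := by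
          unfold pvStepB
          simp only [PySem.Set.contains, hc, Bool.false_eq_true, if_false, hadd, hs,
            ne_eq, not_false_eq_true, if_true]
        have h2 : pvPartsRec (r :: t) seen
            = pvFmt (pvSrc r) (pvSnip r) :: pvPartsRec t (seen ++ [pvSrc r]) := by
          show (if seen.contains (pvSrc r) then pvPartsRec t seen
            else if pvSnip r = "" then pvPartsRec t (seen ++ [pvSrc r])
            else ("**" ++ pvSrc r ++ "**: "
                ++ (if PySem.Str.len (pvSnip r) ≤ 200 then pvSnip r
                    else PySem.Str.slice (pvSnip r) none (some 200) ++ "..."))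
              :: pvPartsRec t (seen ++ [pvSrc r]))
            = pvFmt (pvSrc r) (pvSnip r) :: pvPartsRec t (seen ++ [pvSrc r])
          rw [if_neg hc, if_neg hs, pvFmt, htext]
        rw [h1, h2, ih]
        simp

theorem pvPartsA_eq_rec (results : List (List (String × String))) :
    pvPartsA results = pvPartsRec results [] := by
  rw [pvParts_eq, pvSt]
  simpa using pvFold_eq_rec results [] []

-- ===== VERDICT (by name: the statement is the Claim_ definition above) =====
theorem create_search_summary_py_spec : Claim_equal_create_search_summary_py := by
  intro query results _
  show create_search_summary_py query results = create_search_summary_py_alt query results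
  rw [create_search_summary_py, create_search_summary_py_alt]
  by_cases h : results = []
  · rw [if_pos h, if_pos h]
  · rw [if_neg h, if_neg h]
    show (if pvPartsA results ≠ [] then PySem.Str.join "\n\n" (pvPartsA results)
        else "Found " ++ PySem.Int.toStr (results.length : Int) ++ " results for '" ++ query ++ "' but no detailed information available.")
      = (if pvPartsRec results [] ≠ [] then PySem.Str.join "\n\n" (pvPartsRec results [])
        else "Found " ++ PySem.Int.toStr (results.length : Int) ++ " results for '" ++ query ++ "' but no detailed information available.")
    rw [pvPartsA_eq_rec]
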